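-- pv_equiv track=rewrite | github.com/askhanna/python_exercises | interlock.py | find_interlock_pairs
-- ===== SOURCE A (Python) =====
-- def find_interlock_pairs(words):
--   """
--   Finds all pairs of words that interlock in a given list of words.
--
--   Args:
--     words: A list of words.
--
--   Returns:
--     A list of tuples, where each tuple contains a pair of interlocked words.
--   """
--
--   word_dict = {}
--   for word in words:
--     interlock_word = ''.join([word[i] for i in range(1, len(word), 2)])
--     if interlock_word in word_dict:
--       for other_word in word_dict[interlock_word]:
--         yield (other_word, word)
--     word_dict.setdefault(interlock_word, []).append(word)
-- ===== SOURCE B (Python) =====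
-- def find_interlock_pairs(words):
--   """Pairwise scan: precompute each word's odd-index key, then for every
--   position j compare with every earlier position i, yielding matches."""
--   keys = [w[1::2] for w in words]
--   for j in range(len(words)):
--     for i in range(j):
--       if keys[i] == keys[j]:
--         yield (words[i], words[j])
-- ===== Notes on version B (the rewrite author's own statement) =====
-- stated objective: alternative
-- what changed: Replaces A's dict-of-groups accumulation (hash grouping with setdefault/append) by a direct triangular pairwise scan over precomputed odd-index keys, emitting (words[i], words[j]) for i < j with equal keys; same output order.
import Mathlib
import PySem

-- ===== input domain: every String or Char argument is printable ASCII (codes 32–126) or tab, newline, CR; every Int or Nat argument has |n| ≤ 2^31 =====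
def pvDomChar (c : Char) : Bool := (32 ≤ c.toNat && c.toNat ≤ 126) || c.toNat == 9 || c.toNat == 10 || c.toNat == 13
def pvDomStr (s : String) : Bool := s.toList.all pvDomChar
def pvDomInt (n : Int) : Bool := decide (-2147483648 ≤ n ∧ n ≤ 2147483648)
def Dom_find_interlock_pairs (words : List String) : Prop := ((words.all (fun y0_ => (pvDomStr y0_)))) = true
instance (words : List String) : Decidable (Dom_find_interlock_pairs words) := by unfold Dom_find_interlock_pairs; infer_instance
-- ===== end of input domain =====

-- B replaces A's dict-of-groups accumulation by a direct triangular pairwise scan over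
-- precomputed odd-index keys (same output value and order); objective: alternative algorithm.

-- ===== PORT A =====
-- interlock_word = ''.join([word[i] for i in range(1, len(word), 2)])
def pvKeyA (word : String) : String :=
  PySem.Str.join "" ((PySem.List.pyRange 1 (PySem.Str.len word) 2).map
    (fun i => String.ofList [(PySem.Str.pyGet? word i).getD ' ']))

-- one iteration of A's loop body: state = (pairs yielded so far, word_dict)
def pvStepA (st : List (String × String) × PySem.Dict String (List String)) (word : String) :
    List (String × String) × PySem.Dict String (List String) :=
  let k := pvKeyA word
  let out :=
    match st.2.get? k with
    | some ws => st.1 ++ ws.map (fun ow => (ow, word))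
    | none => st.1
  -- word_dict.setdefault(interlock_word, []).append(word): the value at k becomes old ++ [word]
  (out, st.2.insert k (st.2.getD k [] ++ [word]))

def find_interlock_pairs (words : List String) : List (String × String) :=
  (words.foldl pvStepA ([], PySem.Dict.empty)).1

-- ===== PORT B =====
-- w[1::2]
def pvKeyB (word : String) : String :=
  (PySem.Str.slice? word (some 1) none 2).getD ""

def find_interlock_pairs_alt (words : List String) : List (String × String) :=
  let keys := words.map pvKeyB
  (PySem.List.pyRange 0 ((words.length : Int)) 1).foldl (fun acc j =>
    (PySem.List.pyRange 0 j 1).foldl (fun acc2 i =>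
      if PySem.List.pyGetD keys i "" == PySem.List.pyGetD keys j ""
      then acc2 ++ [(PySem.List.pyGetD words i "", PySem.List.pyGetD words j "")]
      else acc2) acc) []

-- ===== PRECONDITION & SPEC =====
def Spec_find_interlock_pairs (words : List String) (out : List (String × String)) : Prop := out = find_interlock_pairs_alt words
instance (words : List String) (out : List (String × String)) : Decidable (Spec_find_interlock_pairs words out) := by unfold Spec_find_interlock_pairs; infer_instance

-- ===== CLAIM (what is proved, stated in full; the proofs are below) =====
def Claim_equal_find_interlock_pairs : Prop := ∀ (words : List String), Dom_find_interlock_pairs words → Spec_find_interlock_pairs words (find_interlock_pairs words)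

-- ===== LEMMAS AND PROOFS =====

theorem pvGetD_append_left {A : Type} (xs ys : List A) (i : Int) (d : A) (h0 : 0 ≤ i)
    (h : i < (xs.length : Int)) :
    PySem.List.pyGetD (xs ++ ys) i d = PySem.List.pyGetD xs i d := by
  rw [PySem.List.pyGetD_of_nonneg _ _ h0, PySem.List.pyGetD_of_nonneg _ _ h0,
    List.getD_append _ _ _ _ (by omega)]

theorem pvGetD_append_last {A : Type} (xs : List A) (y : A) (d : A) :
    PySem.List.pyGetD (xs ++ [y]) ((xs.length : Int)) d = y := by
  rw [PySem.List.pyGetD_natCast]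
  simp [List.getD]


theorem pvCore (cs : List Char) :
    PySem.Chars.join [] ((PySem.List.pyRange 1 ((cs.length : Int)) 2).map
      (fun i => [(PySem.List.pyGet? cs i).getD ' '])) =
    (PySem.List.slice? cs (some 1) none 2).getD [] := by
  rw [PySem.List.pyRange_of_pos 1 ((cs.length : Int)) (by norm_num)]
  simp only [PySem.List.slice?, PySem.List.sliceIndices]
  norm_num
  rcases cs with _ | ⟨c, t⟩
  · simp
  · have hmin : min (1:Int) (((c::t).length : Int)) = 1 := by
      have : ((c::t).length : Int) = (t.length : Int) + 1 := by simp
      omega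
    rw [hmin]
    rcases t with _ | ⟨c2, t2⟩
    · simp
    · rw [if_pos (by simp : 1 < (c::c2::t2).length)]
      have hmap : ∀ k ∈ List.range ((((c::c2::t2).length : Int) - 1 + 2 - 1) / 2).toNat,
          (c::c2::t2)[(1 + 2 * (k:Int)).toNat]? =
          ((some ∘ fun k : Nat => (PySem.List.pyGet? (c::c2::t2) (1 + 2 * (k:Int))).getD ' ') k) := by
        intro k hk
        simp only [List.mem_range] at hk
        have hlt : 1 + 2 * k < (c::c2::t2).length := by
          have h2 : (c::c2::t2).length = t2.length + 2 := by simp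
          omega
        have hcast : (1 + 2 * (k:Int)) = ((1 + 2 * k : Nat) : Int) := by push_cast; ring
        simp only [Function.comp, hcast, PySem.List.pyGet?_natCast, Int.toNat_natCast]
        rw [List.getElem?_eq_getElem hlt]
        rfl
      rw [List.filterMap_congr (fun k hk => hmap k hk), List.filterMap_eq_map]
      rw [show ((fun i => [(PySem.List.pyGet? (c::c2::t2) i).getD ' ']) ∘ fun k : Nat => 1 + 2 * (k:Int)) =
          ((fun ch => [ch]) ∘ fun k : Nat => (PySem.List.pyGet? (c::c2::t2) (1 + 2 * (k:Int))).getD ' ') from rfl]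
      rw [← List.map_map, PySem.Chars.join_nil_singletons]

-- the two key computations agree
theorem pvKey_eq (w : String) : pvKeyA w = pvKeyB w := by
  rw [← String.toList_inj]
  unfold pvKeyA pvKeyB
  rw [PySem.Str.toList_join]
  simp only [List.map_map, Function.comp_def, String.toList_ofList, PySem.Str.len_eq,
    PySem.Str.pyGet?_eq, PySem.Chars.pyGet?_eq_listPyGet?, String.toList_empty]
  rw [pvCore w.toList]
  simp only [PySem.Str.slice?, PySem.Chars.slice?_eq_listSlice?]
  cases PySem.List.slice? w.toList (some 1) none 2 <;> simp

-- A's loop body, smoothed: the `none` branch appends nothing, so both branches append the getD list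
theorem pvStepA_eq (st : List (String × String) × PySem.Dict String (List String)) (w : String) :
    pvStepA st w =
      (st.1 ++ (st.2.getD (pvKeyA w) []).map (fun ow => (ow, w)),
       st.2.modify (pvKeyA w) [] (· ++ [w])) := by
  unfold pvStepA
  cases h : st.2.get? (pvKeyA w) with
  | none => simp [h, PySem.Dict.modify, PySem.Dict.getD_of_get?_eq_none _ _ h]
  | some vs => simp [h, PySem.Dict.modify, PySem.Dict.getD_of_get?_eq_some _ _ h]

theorem pvA_snd (ws : List String) (o : List (String × String)) (d : PySem.Dict String (List String)) :
    (ws.foldl pvStepA (o, d)).2 = ws.foldl (fun d w => d.modify (pvKeyA w) [] (· ++ [w])) d := by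
  induction ws generalizing o d with
  | nil => rfl
  | cons w ws ih => simp only [List.foldl_cons, pvStepA_eq]; exact ih _ _

theorem pvA_append (ws : List String) (w : String) :
    find_interlock_pairs (ws ++ [w]) =
      find_interlock_pairs ws ++ (ws.filter (fun v => pvKeyA v == pvKeyA w)).map (fun v => (v, w)) := by
  unfold find_interlock_pairs
  rw [List.foldl_append, List.foldl_cons, List.foldl_nil, pvStepA_eq]
  have hsnd := pvA_snd ws [] PySem.Dict.empty
  have hd : (ws.foldl pvStepA ([], PySem.Dict.empty)).2.getD (pvKeyA w) [] =
      (ws.filter (fun v => pvKeyA v == pvKeyA w)) := by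
    rw [hsnd]
    have : ws.foldl (fun d w => d.modify (pvKeyA w) [] (· ++ [w])) PySem.Dict.empty =
        (ws.map (fun v => (pvKeyA v, v))).foldl (fun d p => d.modify p.1 [] (· ++ [p.2]))
          PySem.Dict.empty := by
      rw [List.foldl_map]
    rw [this, PySem.Dict.getD_foldl_modify_append]
    simp [List.filter_map, Function.comp_def, List.map_map]
  simp only [hd]

theorem pvB_append (ws : List String) (w : String) :
    find_interlock_pairs_alt (ws ++ [w]) =
      find_interlock_pairs_alt ws ++ (ws.filter (fun v => pvKeyB v == pvKeyB w)).map (fun v => (v, w)) := by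
  have h0 : (0:Int) ≤ (ws.length : Int) := by positivity
  have hklen : (ws.map pvKeyB).length = ws.length := by simp
  have hlen : (((ws ++ [w]).length : Int)) = (ws.length : Int) + 1 := by simp
  simp only [find_interlock_pairs_alt, List.map_append, List.map_cons, List.map_nil]
  rw [hlen, PySem.List.pyRange_one_succ_right h0, List.foldl_append, List.foldl_cons,
    List.foldl_nil]
  have hbase :
      List.foldl (fun acc j =>
        (PySem.List.pyRange 0 j 1).foldl (fun acc2 i =>
          if PySem.List.pyGetD (ws.map pvKeyB ++ [pvKeyB w]) i "" ==
              PySem.List.pyGetD (ws.map pvKeyB ++ [pvKeyB w]) j ""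
          then acc2 ++ [(PySem.List.pyGetD (ws ++ [w]) i "", PySem.List.pyGetD (ws ++ [w]) j "")]
          else acc2) acc) [] (PySem.List.pyRange 0 ((ws.length : Int)) 1) =
      find_interlock_pairs_alt ws := by
    simp only [find_interlock_pairs_alt]
    apply PySem.List.foldl_congr_mem
    intro acc j hj
    obtain ⟨hj0, hjn⟩ := PySem.List.mem_pyRange_one.mp hj
    apply PySem.List.foldl_congr_mem
    intro acc2 i hi
    obtain ⟨hi0, hij⟩ := PySem.List.mem_pyRange_one.mp hi
    rw [pvGetD_append_left _ _ _ _ hi0 (by rw [hklen]; omega),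
      pvGetD_append_left _ _ _ _ hj0 (by rw [hklen]; exact_mod_cast hjn),
      pvGetD_append_left _ _ _ _ hi0 (by omega),
      pvGetD_append_left _ _ _ _ hj0 (by exact_mod_cast hjn)]
  rw [hbase]
  have hkw : PySem.List.pyGetD (ws.map pvKeyB ++ [pvKeyB w]) ((ws.length : Int)) "" = pvKeyB w := by
    have := pvGetD_append_last (ws.map pvKeyB) (pvKeyB w) ""
    rw [hklen] at this; exact this
  have hww : PySem.List.pyGetD (ws ++ [w]) ((ws.length : Int)) "" = w :=
    pvGetD_append_last ws w ""
  rw [hkw, hww]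
  have hinner :
      List.foldl (fun acc2 i =>
        if PySem.List.pyGetD (ws.map pvKeyB ++ [pvKeyB w]) i "" == pvKeyB w
        then acc2 ++ [(PySem.List.pyGetD (ws ++ [w]) i "", w)]
        else acc2) (find_interlock_pairs_alt ws) (PySem.List.pyRange 0 ((ws.length : Int)) 1) =
      List.foldl (fun acc2 i =>
        (fun acc2 (v : String) => if pvKeyB v == pvKeyB w then acc2 ++ [(v, w)] else acc2)
          acc2 (PySem.List.pyGetD ws i "")) (find_interlock_pairs_alt ws)
        (PySem.List.pyRange 0 ((ws.length : Int)) 1) := by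
    apply PySem.List.foldl_congr_mem
    intro acc2 i hi
    obtain ⟨hi0, hin⟩ := PySem.List.mem_pyRange_one.mp hi
    rw [pvGetD_append_left _ _ _ _ hi0 (by rw [hklen]; exact_mod_cast hin),
      pvGetD_append_left _ _ _ _ hi0 (by exact_mod_cast hin)]
    have : PySem.List.pyGetD (ws.map pvKeyB) i "" = pvKeyB (PySem.List.pyGetD ws i "") := by
      have h := PySem.List.pyGetD_map pvKeyB ws i ""
      simpa using h
    rw [this]
  rw [hinner, PySem.List.foldl_pyRange_zero_pyGetD' ws ""
    (fun acc2 (v : String) => if pvKeyB v == pvKeyB w then acc2 ++ [(v, w)] else acc2) _,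
    PySem.List.foldl_append_if]
  simp only [find_interlock_pairs_alt]

theorem pvMain (words : List String) : find_interlock_pairs words = find_interlock_pairs_alt words := by
  induction words using List.reverseRecOn with
  | nil => rfl
  | append_singleton ws w ih =>
      rw [pvA_append, pvB_append, ih]
      simp only [pvKey_eq]

-- ===== VERDICT (by name: the statement is the Claim_ definition above) =====
theorem find_interlock_pairs_spec : Claim_equal_find_interlock_pairs := by
  intro words _
  unfold Spec_find_interlock_pairs
  exact pvMain words
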